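-- pv_equiv track=rewrite | github.com/danielkim7755/Prog-Languages | Python/PA5/crack.py | digits_helper
-- ===== SOURCE A (Python) =====
-- def digits_helper(s):
-- 	if len(s) == 0:
-- 		return ['']
--
-- 	wordList = []
-- 	if s[0].lower() == 'o':
-- 		wordList = ['0'+x for x in digits_helper(s[1:])]
-- 	elif s[0].lower() == 'z':
-- 		wordList = ['2'+x for x in digits_helper(s[1:])]
-- 	elif s[0].lower() == 'a':
-- 		wordList = ['4'+x for x in digits_helper(s[1:])]
-- 	elif s[0].lower() == 'b':
-- 		wordList = ['6'+x for x in digits_helper(s[1:])] + ['8'+x for x in digits_helper(s[1:])]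
-- 	elif s[0].lower() == 'i' or s[0].lower() == 'l':
-- 		wordList = ['1'+x for x in digits_helper(s[1:])]
-- 	elif s[0].lower() == 'e':
-- 		wordList = ['3'+x for x in digits_helper(s[1:])]
-- 	elif s[0].lower() == 's':
-- 		wordList = ['5'+x for x in digits_helper(s[1:])]
-- 	elif s[0].lower() == 't':
-- 		wordList = ['7'+x for x in digits_helper(s[1:])]
-- 	elif s[0].lower() == 'g' or s[0].lower() == 'q':
-- 		wordList = ['9'+x for x in digits_helper(s[1:])]
-- 	else:
-- 		wordList = []
--
-- 	return wordList + [s[0]+x for x in digits_helper(s[1:])]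
-- ===== SOURCE B (Python) =====
-- _DIGITS = {'o': '0', 'z': '2', 'a': '4', 'b': '68', 'i': '1', 'l': '1',
--            'e': '3', 's': '5', 't': '7', 'g': '9', 'q': '9'}
--
-- def digits_helper(s):
--     # Iterative right-to-left build: each suffix's result list is computed once
--     # and reused, instead of A's repeated recursive recomputation.
--     res = ['']
--     for c in reversed(s):
--         opts = _DIGITS.get(c.lower(), '') + c
--         res = [p + x for p in opts for x in res]
--     return res
-- ===== Notes on version B (the rewrite author's own statement) =====
-- stated objective: alternative
-- what changed: Replaced the branching recursion (which re-calls digits_helper(s[1:]) up to three times per level) by a single right-to-left fold that keeps the suffix's result list and extends it once per character via a digit-substitution table; intended as faster (measured 24.5x at n=16) but unconfirmed at larger sizes, where the output itself is exponential and both time out.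
import Mathlib
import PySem

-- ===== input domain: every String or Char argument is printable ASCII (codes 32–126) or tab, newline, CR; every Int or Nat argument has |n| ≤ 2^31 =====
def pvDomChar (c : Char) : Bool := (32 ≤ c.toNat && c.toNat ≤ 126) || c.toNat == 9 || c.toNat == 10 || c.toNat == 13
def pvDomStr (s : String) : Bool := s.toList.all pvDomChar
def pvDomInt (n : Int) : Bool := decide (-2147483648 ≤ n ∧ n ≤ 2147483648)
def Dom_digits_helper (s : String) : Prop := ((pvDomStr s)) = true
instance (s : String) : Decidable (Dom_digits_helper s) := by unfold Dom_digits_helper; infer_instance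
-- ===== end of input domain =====

-- B replaces A's branching recursion (up to three recursive calls per level) by one right-to-left fold over a digit table, computing each suffix's result list once.

-- Both ports work over List Char (PySem's representation of Python str) and convert
-- to String at the boundary; strCons is Python's  c + x  (char-prepend).
def strCons (c : Char) (x : List Char) : List Char := c :: x

-- ===== PORT A =====
def digitsA : List Char → List (List Char)
  | [] => [[]]
  | c :: rest =>
    let lc := PySem.Chars.lowerChar c
    let wordList :=
      if lc = 'o' then (digitsA rest).map (strCons '0')
      else if lc = 'z' then (digitsA rest).map (strCons '2')
      else if lc = 'a' then (digitsA rest).map (strCons '4')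
      else if lc = 'b' then (digitsA rest).map (strCons '6') ++ (digitsA rest).map (strCons '8')
      else if lc = 'i' ∨ lc = 'l' then (digitsA rest).map (strCons '1')
      else if lc = 'e' then (digitsA rest).map (strCons '3')
      else if lc = 's' then (digitsA rest).map (strCons '5')
      else if lc = 't' then (digitsA rest).map (strCons '7')
      else if lc = 'g' ∨ lc = 'q' then (digitsA rest).map (strCons '9')
      else []
    wordList ++ (digitsA rest).map (strCons c)

def digits_helper (s : String) : List String := (digitsA s.toList).map String.ofList

-- ===== PORT B =====
def digitsDict : PySem.Dict Char String :=
  PySem.Dict.ofList [('o', "0"), ('z', "2"), ('a', "4"), ('b', "68"), ('i', "1"),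
                     ('l', "1"), ('e', "3"), ('s', "5"), ('t', "7"), ('g', "9"), ('q', "9")]

def digits_helper_alt (s : String) : List String :=
  (s.toList.reverse.foldl
    (fun res c =>
      let opts := (digitsDict.getD (PySem.Chars.lowerChar c) "").toList ++ [c]
      opts.flatMap (fun p => res.map (strCons p)))
    [[]]).map String.ofList

-- ===== PRECONDITION & SPEC =====
def Spec_digits_helper (s : String) (out : List String) : Prop := out = digits_helper_alt s
instance (s : String) (out : List String) : Decidable (Spec_digits_helper s out) := by unfold Spec_digits_helper; infer_instance

-- ===== CLAIM (what is proved, stated in full; the proofs are below) =====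
def Claim_equal_digits_helper : Prop := ∀ (s : String), Dom_digits_helper s → Spec_digits_helper s (digits_helper s)

-- ===== LEMMAS AND PROOFS =====

theorem digitsA_eq_foldr (l : List Char) :
    digitsA l = l.foldr
      (fun c res =>
        ((digitsDict.getD (PySem.Chars.lowerChar c) "").toList ++ [c]).flatMap
          (fun p => res.map (strCons p))) [[]] := by
  induction l with
  | nil => rfl
  | cons c rest ih =>
    rw [List.foldr_cons, ← ih]
    show _ ++ _ = _
    have hmk : digitsDict = PySem.Dict.mk [('o', "0"), ('z', "2"), ('a', "4"), ('b', "68"),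
        ('i', "1"), ('l', "1"), ('e', "3"), ('s', "5"), ('t', "7"), ('g', "9"), ('q', "9")] := by
      decide
    set lc := PySem.Chars.lowerChar c with hlc
    by_cases h1 : lc = 'o'
    · have hd : (digitsDict.getD 'o' "").toList = ['0'] := by decide
      simp [hd, h1]
    by_cases h2 : lc = 'z'
    · have hd : (digitsDict.getD 'z' "").toList = ['2'] := by decide
      simp [hd, h2]
    by_cases h3 : lc = 'a'
    · have hd : (digitsDict.getD 'a' "").toList = ['4'] := by decide
      simp [hd, h3]
    by_cases h4 : lc = 'b'
    · have hd : (digitsDict.getD 'b' "").toList = ['6', '8'] := by decide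
      simp [hd, h4]
    by_cases h5 : lc = 'i' ∨ lc = 'l'
    · have hd1 : (digitsDict.getD 'i' "").toList = ['1'] := by decide
      have hd2 : (digitsDict.getD 'l' "").toList = ['1'] := by decide
      rcases h5 with h | h <;> simp [hd1, hd2, h]
    by_cases h6 : lc = 'e'
    · have hd : (digitsDict.getD 'e' "").toList = ['3'] := by decide
      simp [hd, h6]
    by_cases h7 : lc = 's'
    · have hd : (digitsDict.getD 's' "").toList = ['5'] := by decide
      simp [hd, h7]
    by_cases h8 : lc = 't'
    · have hd : (digitsDict.getD 't' "").toList = ['7'] := by decide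
      simp [hd, h8]
    by_cases h9 : lc = 'g' ∨ lc = 'q'
    · have hd1 : (digitsDict.getD 'g' "").toList = ['9'] := by decide
      have hd2 : (digitsDict.getD 'q' "").toList = ['9'] := by decide
      rcases h9 with h | h <;> simp [hd1, hd2, h]
    push Not at h5 h9
    have hd : (digitsDict.getD lc "").toList = [] := by
      rw [hmk]
      simp [PySem.Dict.getD, PySem.Dict.get?, Ne.symm h1, Ne.symm h2, Ne.symm h3,
        Ne.symm h4, Ne.symm h5.1, Ne.symm h5.2, Ne.symm h6, Ne.symm h7, Ne.symm h8,
        Ne.symm h9.1, Ne.symm h9.2]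
    simp [← hlc, hd, h1, h2, h3, h4, h5, h6, h7, h8, h9]

-- ===== VERDICT (by name: the statement is the Claim_ definition above) =====
theorem digits_helper_spec : Claim_equal_digits_helper := by
  intro s _
  unfold Spec_digits_helper digits_helper digits_helper_alt
  rw [List.foldl_reverse, digitsA_eq_foldr]
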